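-- pv_equiv track=rewrite | github.com/cfeenstra67/advent-of-code | 2023/day2.py | fewest_total_cubes
-- ===== SOURCE A (Python) =====
-- from typing import Dict, List, Tuple
--
-- def fewest_total_cubes(instances: List[Dict[str, int]]) -> Dict[str, int]:
--     out = {}
--     for instance in instances:
--         for key, value in instance.items():
--             if key in out:
--                 out[key] = max(out[key], value)
--             else:
--                 out[key] = value
--     return out
-- ===== SOURCE B (Python) =====
-- from typing import Dict, List, Tuple
--
-- def fewest_total_cubes(instances: List[Dict[str, int]]) -> Dict[str, int]:
--     # two-pass: group every value seen per key, then reduce each group with max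
--     grouped = {}
--     for instance in instances:
--         for key, value in instance.items():
--             grouped.setdefault(key, []).append(value)
--     return {key: max(values) for key, values in grouped.items()}
-- ===== Notes on version B (the rewrite author's own statement) =====
-- stated objective: alternative
-- what changed: A fuses accumulation and max into one in-loop update; B first groups all values per key into lists in one pass and then builds the result in a separate reduce pass taking max of each group.
import Mathlib
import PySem

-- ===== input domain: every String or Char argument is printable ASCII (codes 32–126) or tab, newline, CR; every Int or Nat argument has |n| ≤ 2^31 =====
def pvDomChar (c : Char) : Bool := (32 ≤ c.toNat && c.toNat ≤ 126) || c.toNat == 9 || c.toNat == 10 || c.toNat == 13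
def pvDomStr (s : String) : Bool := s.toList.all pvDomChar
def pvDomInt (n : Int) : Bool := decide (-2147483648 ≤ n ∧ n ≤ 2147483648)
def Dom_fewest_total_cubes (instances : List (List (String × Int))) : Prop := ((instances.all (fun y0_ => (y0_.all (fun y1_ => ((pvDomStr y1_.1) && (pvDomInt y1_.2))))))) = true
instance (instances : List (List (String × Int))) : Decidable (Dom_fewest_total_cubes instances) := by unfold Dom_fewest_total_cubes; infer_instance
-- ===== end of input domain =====

-- B replaces A's fused in-loop max-update by a group-then-reduce two-pass form (alternative decomposition, same cost).
-- Each Python dict argument arrives as an association list; PySem.Dict.ofList rebuilds the dict (last duplicate wins), in both ports.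

-- ===== PORT A =====
def fewest_total_cubes (instances : List (List (String × Int))) : List (String × Int) :=
  (instances.foldl (fun out inst =>
      ((PySem.Dict.ofList inst).items).foldl (fun out p =>
        out.insert p.1 (match out.get? p.1 with
          | some w => max w p.2        -- if key in out: out[key] = max(out[key], value)
          | none => p.2)) out)         -- else: out[key] = value
    PySem.Dict.empty).items

-- ===== PORT B =====
def pvMaxOf (vs : List Int) : Int :=   -- Python max(values) on a nonempty list
  match vs with
  | [] => 0
  | v :: rest => rest.foldl max v

def fewest_total_cubes_alt (instances : List (List (String × Int))) : List (String × Int) :=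
  ((instances.foldl (fun grouped inst =>
      ((PySem.Dict.ofList inst).items).foldl (fun grouped p =>
        grouped.modify p.1 [] (· ++ [p.2])) grouped)      -- grouped.setdefault(key, []).append(value)
    (PySem.Dict.empty : PySem.Dict String (List Int))).items).map
    (fun kv => (kv.1, pvMaxOf kv.2))                      -- {key: max(values) for key, values in grouped.items()}

-- ===== PRECONDITION & SPEC =====
def Spec_fewest_total_cubes (instances : List (List (String × Int))) (out : List (String × Int)) : Prop := out = fewest_total_cubes_alt instances
instance (instances : List (List (String × Int))) (out : List (String × Int)) : Decidable (Spec_fewest_total_cubes instances out) := by unfold Spec_fewest_total_cubes; infer_instance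

-- ===== CLAIM (what is proved, stated in full; the proofs are below) =====
def Claim_equal_fewest_total_cubes : Prop := ∀ (instances : List (List (String × Int))), Dom_fewest_total_cubes instances → Spec_fewest_total_cubes instances (fewest_total_cubes instances)

-- ===== LEMMAS AND PROOFS =====

-- the flat list of (key, value) pairs both nested loops traverse
def pvPairs (instances : List (List (String × Int))) : List (String × Int) :=
  instances.flatMap (fun inst => (PySem.Dict.ofList inst).items)

def pvStepA (d : PySem.Dict String Int) (p : String × Int) : PySem.Dict String Int :=
  d.insert p.1 (match d.get? p.1 with | some w => max w p.2 | none => p.2)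

def pvStepG (d : PySem.Dict String (List Int)) (p : String × Int) : PySem.Dict String (List Int) :=
  d.modify p.1 [] (· ++ [p.2])

theorem pvFoldFlat {α β : Type} (f : α → β → α) (l : List (List β)) (init : α) :
    l.foldl (fun a xs => xs.foldl f a) init = (l.flatMap id).foldl f init := by
  induction l generalizing init with
  | nil => rfl
  | cons x xs ih => simp [List.foldl_append, ih]

theorem pvA_flat (instances : List (List (String × Int))) :
    fewest_total_cubes instances = ((pvPairs instances).foldl pvStepA PySem.Dict.empty).items := by
  unfold fewest_total_cubes pvPairs pvStepA
  rw [show (instances.flatMap fun inst => (PySem.Dict.ofList inst).items)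
        = (instances.map fun inst => (PySem.Dict.ofList inst).items).flatMap id by
      simp [List.flatMap_def]]
  rw [← pvFoldFlat]
  simp [List.foldl_map]

theorem pvB_flat (instances : List (List (String × Int))) :
    fewest_total_cubes_alt instances
      = (((pvPairs instances).foldl pvStepG PySem.Dict.empty).items).map (fun kv => (kv.1, pvMaxOf kv.2)) := by
  unfold fewest_total_cubes_alt pvPairs pvStepG
  rw [show (instances.flatMap fun inst => (PySem.Dict.ofList inst).items)
        = (instances.map fun inst => (PySem.Dict.ofList inst).items).flatMap id by
      simp [List.flatMap_def]]
  rw [← pvFoldFlat]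
  simp [List.foldl_map]

-- the accumulated max viewed as an Option fold
def pvComb (o : Option Int) (v : Int) : Option Int :=
  some (match o with | some w => max w v | none => v)

theorem pvA_get? (ps : List (String × Int)) (d : PySem.Dict String Int) (k : String) :
    (ps.foldl pvStepA d).get? k = ((ps.filter (fun p => p.1 == k)).map (·.2)).foldl pvComb (d.get? k) := by
  induction ps generalizing d with
  | nil => rfl
  | cons p ps ih =>
    simp only [List.foldl_cons, List.filter_cons]
    by_cases h : p.1 = k
    · subst h
      simp only [beq_self_eq_true, if_pos, List.map_cons, List.foldl_cons, ih]
      congr 1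
      simp [pvStepA, PySem.Dict.get?_insert_self, pvComb]
    · have hb : (p.1 == k) = false := by simp [h]
      simp only [hb, if_neg, Bool.false_eq_true, not_false_iff, ih]
      congr 1
      simp only [pvStepA, PySem.Dict.get?_insert]
      rw [if_neg (fun hk => h hk.symm)]

theorem pvComb_some (vs : List Int) (w : Int) :
    vs.foldl pvComb (some w) = some (vs.foldl max w) := by
  induction vs generalizing w with
  | nil => rfl
  | cons v vs ih => simp [pvComb, ih]

theorem pvComb_max (v : Int) (vs : List Int) :
    (v :: vs).foldl pvComb none = some (pvMaxOf (v :: vs)) := by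
  simp [pvComb, pvComb_some, pvMaxOf]

theorem pvKeysA (ps : List (String × Int)) :
    (ps.foldl pvStepA PySem.Dict.empty).keys = PySem.Set.ofList (ps.map (·.1)) := by
  have := PySem.Dict.keys_foldl_insert_key (l := ps) (key := (·.1))
    (f := fun d p => (match d.get? p.1 with | some w => max w p.2 | none => p.2)) (d := PySem.Dict.empty)
  simpa [pvStepA, PySem.Dict.keys_empty, PySem.Set.update_nil_left] using this

theorem pvKeysG (ps : List (String × Int)) :
    (ps.foldl pvStepG PySem.Dict.empty).keys = PySem.Set.ofList (ps.map (·.1)) := by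
  have := PySem.Dict.keys_foldl_modify_key (l := ps) (key := (·.1))
    (d0 := ([] : List Int)) (f := fun (d : PySem.Dict String (List Int)) p => (· ++ [p.2])) (d := PySem.Dict.empty)
  simpa [pvStepG, PySem.Dict.keys_empty, PySem.Set.update_nil_left] using this

theorem pvCore (ps : List (String × Int)) :
    (ps.foldl pvStepA PySem.Dict.empty).items
      = ((ps.foldl pvStepG PySem.Dict.empty).items).map (fun kv => (kv.1, pvMaxOf kv.2)) := by
  have hndA : (ps.foldl pvStepA PySem.Dict.empty).keys.Nodup := by
    have := PySem.Dict.nodup_keys_foldl_insert_key ps (·.1)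
      (fun d p => (match d.get? p.1 with | some w => max w p.2 | none => p.2)) PySem.Dict.empty
      (by simp [PySem.Dict.keys_empty])
    simpa [pvStepA] using this
  have hndG : (ps.foldl pvStepG PySem.Dict.empty).keys.Nodup := by
    have := PySem.Dict.nodup_keys_foldl_modify_key ps (·.1) ([] : List Int)
      (fun (d : PySem.Dict String (List Int)) p => (· ++ [p.2])) PySem.Dict.empty
      (by simp [PySem.Dict.keys_empty])
    simpa [pvStepG] using this
  rw [PySem.Dict.items_eq_map_keys _ hndA 0, PySem.Dict.items_eq_map_keys _ hndG []]
  rw [List.map_map, pvKeysA, pvKeysG]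
  apply List.map_congr_left
  intro k hk
  simp only [Function.comp]
  congr 1
  -- values: A's running max at k = max of B's grouped list at k
  have hG : ((ps.foldl pvStepG PySem.Dict.empty).getD k []) = (ps.filter (fun p => p.1 == k)).map (·.2) := by
    have := PySem.Dict.getD_foldl_modify_append (l := ps) (d := (PySem.Dict.empty : PySem.Dict String (List Int))) (c := k)
    simpa [pvStepG, PySem.Dict.getD_empty] using this
  have hkmem : ∃ p ∈ ps, p.1 = k := by
    have := (PySem.Set.mem_ofList (xs := ps.map (·.1)) (y := k)).mp hk
    simpa using this
  have hne : (ps.filter (fun p => p.1 == k)).map (·.2) ≠ [] := by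
    obtain ⟨p, hp, hpk⟩ := hkmem
    simp only [ne_eq, List.map_eq_nil_iff, List.filter_eq_nil_iff, not_forall]
    exact ⟨p, hp, by simp [hpk]⟩
  have hA := pvA_get? ps PySem.Dict.empty k
  rw [PySem.Dict.get?_empty] at hA
  rw [hG]
  obtain ⟨v, vs, hvvs⟩ := List.exists_cons_of_ne_nil hne
  rw [hvvs] at hA ⊢
  rw [pvComb_max] at hA
  rw [PySem.Dict.getD_eq_get?_getD, hA]
  rfl

-- ===== VERDICT (by name: the statement is the Claim_ definition above) =====
theorem fewest_total_cubes_spec : Claim_equal_fewest_total_cubes := by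
  intro instances _
  unfold Spec_fewest_total_cubes
  rw [pvA_flat, pvB_flat, pvCore]
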